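-- pv_equiv track=rewrite | github.com/abbierm/RecursionWorksheet | templates/answers/get_string_combos.py | get_string_combos
-- ===== SOURCE A (Python) =====
-- def get_string_combos(chars: str, k: int) -> list[str]:
--     if k == 0:
--         return ['']
--     if len(chars) == 0:
--         return []
--
--     results = []
--     head, rest = chars[0:1], chars[1:]
--     rest_combos = get_string_combos(rest, k - 1)
--     for rest_combo in rest_combos:
--         results.append(head + rest_combo)
--     results.extend(get_string_combos(rest, k))
--     return results
-- ===== SOURCE B (Python) =====
-- def get_string_combos(chars: str, k: int) -> list[str]:
--     if k < 0:
--         return []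
--
--     def go(s: str, j: int) -> list[str]:
--         if j == 0:
--             return ['']
--         return [s[i] + t
--                 for i in range(len(s) - j + 1)
--                 for t in go(s[i + 1:], j - 1)]
--
--     return go(chars, k)
-- ===== Notes on version B (the rewrite author's own statement) =====
-- stated objective: alternative
-- what changed: Replaces A's binary include/exclude recursion on the head character with a recursion on the combination length that loops over the position of the first chosen character (pruning branches with fewer remaining characters than needed), after an explicit k < 0 guard.
import Mathlib
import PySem

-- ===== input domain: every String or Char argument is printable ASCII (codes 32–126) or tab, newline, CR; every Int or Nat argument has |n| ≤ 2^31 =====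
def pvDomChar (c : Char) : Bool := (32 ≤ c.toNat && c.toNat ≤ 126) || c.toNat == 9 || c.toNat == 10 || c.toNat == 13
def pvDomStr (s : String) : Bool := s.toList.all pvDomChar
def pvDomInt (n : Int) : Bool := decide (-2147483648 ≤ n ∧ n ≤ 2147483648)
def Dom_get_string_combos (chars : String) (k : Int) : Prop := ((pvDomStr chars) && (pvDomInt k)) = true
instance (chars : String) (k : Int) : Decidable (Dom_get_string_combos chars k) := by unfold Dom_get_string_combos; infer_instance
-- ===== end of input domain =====

-- B replaces A's include/exclude head recursion by a recursion on the length that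
-- loops over the position of the first chosen character (alternative decomposition).

-- ===== PORT A =====
-- A's recursion over the character list (head = chars[0:1], rest = chars[1:]);
-- strings are assembled from char-list combos at the top level (exact: '+' on
-- Python strings is concatenation of their characters).
def pvAGo : List Char → Int → List (List Char)
  | cs, k =>
    if k = 0 then [[]]
    else
      match cs with
      | [] => []
      | c :: rest =>
        ((pvAGo rest (k - 1)).map (fun t => c :: t)) ++ pvAGo rest k

def get_string_combos (chars : String) (k : Int) : List String :=
  (pvAGo chars.toList k).map String.ofList

-- ===== PORT B =====
-- B's helper go(s, j): recursion on j; 'for i in range(len(s) - j + 1)' is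
-- List.range (len + 1 - j) (Nat subtraction truncates at 0 exactly as Python's
-- empty range does for len - j + 1 <= 0); s[i] is in range, ported as getD.
def pvBGo : List Char → Nat → List (List Char)
  | _, 0 => [[]]
  | s, j + 1 =>
    (List.range (s.length + 1 - (j + 1))).flatMap
      (fun i => ((pvBGo (s.drop (i + 1)) j).map (fun t => s.getD i ' ' :: t)))

def get_string_combos_alt (chars : String) (k : Int) : List String :=
  if k < 0 then []
  else (pvBGo chars.toList k.toNat).map String.ofList

-- ===== PRECONDITION & SPEC =====
def Spec_get_string_combos (chars : String) (k : Int) (out : List String) : Prop := out = get_string_combos_alt chars k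
instance (chars : String) (k : Int) (out : List String) : Decidable (Spec_get_string_combos chars k out) := by unfold Spec_get_string_combos; infer_instance

-- ===== CLAIM (what is proved, stated in full; the proofs are below) =====
def Claim_equal_get_string_combos : Prop := ∀ (chars : String) (k : Int), Dom_get_string_combos chars k → Spec_get_string_combos chars k (get_string_combos chars k)

-- ===== LEMMAS AND PROOFS =====

theorem pvAGo_neg (cs : List Char) (k : Int) (hk : k < 0) : pvAGo cs k = [] := by
  induction cs generalizing k with
  | nil => unfold pvAGo; simp [show k ≠ 0 by omega]
  | cons c rest ih =>
    unfold pvAGo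
    simp [show k ≠ 0 by omega, ih (k - 1) (by omega), ih k hk]

theorem pvAGo_short (cs : List Char) (k : Int) (hk : (cs.length : Int) < k) :
    pvAGo cs k = [] := by
  induction cs generalizing k with
  | nil => unfold pvAGo; simp at hk ⊢; omega
  | cons c rest ih =>
    unfold pvAGo
    simp at hk
    simp [show k ≠ 0 by omega, ih (k - 1) (by omega), ih k (by omega)]

theorem pvBGo_succ (s : List Char) (j : Nat) :
    pvBGo s (j + 1) = (List.range (s.length + 1 - (j + 1))).flatMap
      (fun i => ((pvBGo (s.drop (i + 1)) j).map (fun t => s.getD i ' ' :: t))) := rfl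

theorem pvAGo_eq_pvBGo (cs : List Char) (j : Nat) : pvAGo cs (j : Int) = pvBGo cs j := by
  induction cs generalizing j with
  | nil =>
    cases j with
    | zero => unfold pvAGo pvBGo; simp
    | succ j => unfold pvAGo pvBGo; simp; omega
  | cons c rest ih =>
    cases j with
    | zero => unfold pvAGo pvBGo; simp
    | succ j =>
      have hA : pvAGo (c :: rest) (((j + 1 : Nat)) : Int)
          = ((pvAGo rest (j : Int)).map (fun t => c :: t)) ++ pvAGo rest (((j + 1 : Nat)) : Int) := by
        conv_lhs => rw [pvAGo]
        rw [if_neg (by push_cast; omega)]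
        simp only [Nat.cast_add, Nat.cast_one, add_sub_cancel_right]
      rw [hA, ih j, ih (j + 1)]
      by_cases hlen : j ≤ rest.length
      · -- enough characters: peel off i = 0 from B's range
        have hcount : (c :: rest).length + 1 - (j + 1) = (rest.length - j) + 1 := by
          simp; omega
        have hrest : rest.length + 1 - (j + 1) = rest.length - j := by omega
        rw [pvBGo_succ (c :: rest) j, hcount, List.range_succ_eq_map,
            List.flatMap_cons, List.flatMap_map]
        simp only [zero_add, List.drop_succ_cons, List.getD_cons_zero, List.getD_cons_succ,
          List.drop_zero]
        congr 1
        rw [pvBGo_succ rest j, hrest]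
      · -- too few characters: both sides empty
        have hcount : (c :: rest).length + 1 - (j + 1) = 0 := by simp; omega
        have h1 : pvBGo rest j = pvAGo rest (j : Int) := (ih j).symm
        have h2 : pvBGo rest (j + 1) = pvAGo rest (((j + 1 : Nat)) : Int) := (ih (j + 1)).symm
        rw [h1, h2,
            pvAGo_short rest (j : Int) (by exact_mod_cast by omega),
            pvAGo_short rest (((j + 1 : Nat)) : Int) (by push_cast; omega)]
        rw [pvBGo_succ (c :: rest) j, hcount]
        simp

-- ===== VERDICT (by name: the statement is the Claim_ definition above) =====
theorem get_string_combos_spec : Claim_equal_get_string_combos := by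
  intro chars k _hdom
  unfold Spec_get_string_combos get_string_combos get_string_combos_alt
  by_cases hk : k < 0
  · simp [hk, pvAGo_neg chars.toList k hk]
  · have hkk : k = (k.toNat : Int) := by omega
    have h2 := pvAGo_eq_pvBGo chars.toList k.toNat
    rw [← hkk] at h2
    rw [if_neg hk, h2]
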